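-- pv_equiv track=rewrite | github.com/pypi-data/pypi-mirror-297 | packages/pktlab/pktlab-1.0.4-py3-none-any.whl/pktlab/ppks/_utils.py | is_valid_info_value_str
-- ===== SOURCE A (Python) =====
-- def is_valid_info_value_str(value_str): # for free-style fields
--     valid_special_char = {
--         '_', '-', '.', ':', '[', ']', ',', '/', '(', ')', ' ', '\t',
--     }
--
--     # only special char and alnum allowed
--     for i in value_str:
--         if i not in valid_special_char and \
--            not is_alnum(i):
--            return False
--
--     return True
--
-- def is_alpha(c):
--     return \
--         ('a' <= c and c <= 'z') or \
--         ('A' <= c and c <= 'Z')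
--
-- def is_digit(c):
--     return ('0' <= c and c <= '9')
--
-- def is_alnum(c):
--     return is_digit(c) or is_alpha(c)
-- ===== SOURCE B (Python) =====
-- ALLOWED = frozenset(
--     "_-.:[],/() \t"
--     "abcdefghijklmnopqrstuvwxyz"
--     "ABCDEFGHIJKLMNOPQRSTUVWXYZ"
--     "0123456789"
-- )
--
-- def is_valid_info_value_str(value_str):  # for free-style fields
--     return set(value_str) <= ALLOWED
-- ===== Notes on version B (the rewrite author's own statement) =====
-- stated objective: simpler
-- what changed: Replaces the per-character guarded loop with early return (special-set membership plus ASCII range checks per char) by precomputing one frozenset of all allowed characters and doing a single deduplicating subset test set(value_str) <= ALLOWED; the subset test runs in C rather than a Python-level loop.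
import Mathlib
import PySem

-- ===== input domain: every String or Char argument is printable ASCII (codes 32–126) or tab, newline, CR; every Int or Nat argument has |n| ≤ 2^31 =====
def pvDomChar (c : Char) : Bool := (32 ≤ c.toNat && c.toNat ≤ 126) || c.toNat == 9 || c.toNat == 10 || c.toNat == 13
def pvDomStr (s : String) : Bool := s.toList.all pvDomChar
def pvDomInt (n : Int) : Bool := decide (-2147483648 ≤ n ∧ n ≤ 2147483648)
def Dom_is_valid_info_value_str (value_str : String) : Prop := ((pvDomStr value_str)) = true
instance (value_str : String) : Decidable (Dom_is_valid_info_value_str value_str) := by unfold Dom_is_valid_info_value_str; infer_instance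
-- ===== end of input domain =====

-- B replaces A's per-character guarded early-return loop by one precomputed allowed-set and a single subset test (objective: simpler).

-- ===== PORT A =====
def is_alpha (c : Char) : Bool := ('a' ≤ c && c ≤ 'z') || ('A' ≤ c && c ≤ 'Z')

def is_digit (c : Char) : Bool := ('0' ≤ c && c ≤ '9')

def is_alnum (c : Char) : Bool := is_digit c || is_alpha c

-- the local set literal 'valid_special_char' of A
def pvValidSpecial : PySem.Set Char :=
  PySem.Set.ofList ['_', '-', '.', ':', '[', ']', ',', '/', '(', ')', ' ', '\t']

-- the 'for i in value_str: if … return False' loop of A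
def pvScanA : List Char → Bool
  | [] => true
  | i :: rest =>
      if !(PySem.Set.contains pvValidSpecial i) && !(is_alnum i) then false
      else pvScanA rest

def is_valid_info_value_str (value_str : String) : Bool := pvScanA value_str.toList

-- ===== PORT B =====
def ALLOWED : PySem.Set Char :=
  PySem.Set.ofList ("_-.:[],/() \tabcdefghijklmnopqrstuvwxyzABCDEFGHIJKLMNOPQRSTUVWXYZ0123456789".toList)

def is_valid_info_value_str_alt (value_str : String) : Bool :=
  PySem.Set.issubset (PySem.Set.ofList value_str.toList) ALLOWED

-- ===== PRECONDITION & SPEC =====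
def Spec_is_valid_info_value_str (value_str : String) (out : Bool) : Prop := out = is_valid_info_value_str_alt value_str
instance (value_str : String) (out : Bool) : Decidable (Spec_is_valid_info_value_str value_str out) := by unfold Spec_is_valid_info_value_str; infer_instance

-- ===== CLAIM (what is proved, stated in full; the proofs are below) =====
def Claim_equal_is_valid_info_value_str : Prop := ∀ (value_str : String), Dom_is_valid_info_value_str value_str → Spec_is_valid_info_value_str value_str (is_valid_info_value_str value_str)

-- ===== LEMMAS AND PROOFS =====
def pvOk (c : Char) : Bool := decide (c ∈ pvValidSpecial) || is_alnum c

set_option maxRecDepth 8192 in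
theorem mem_ALLOWED_iff (c : Char) : c ∈ ALLOWED ↔ pvOk c = true := by
  have h : ALLOWED = ['_','-','.',':','[',']',',','/','(',')',' ','\t','a','b','c','d','e','f','g','h','i','j','k','l','m','n','o','p','q','r','s','t','u','v','w','x','y','z','A','B','C','D','E','F','G','H','I','J','K','L','M','N','O','P','Q','R','S','T','U','V','W','X','Y','Z','0','1','2','3','4','5','6','7','8','9'] := by decide
  rw [h]
  simp [pvOk, pvValidSpecial, is_alnum, is_digit, is_alpha,
    List.mem_cons, Char.le_def, Char.ext_iff, UInt32.le_iff_toNat_le, ← UInt32.toNat_inj]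
  omega

theorem scanA_eq_all (l : List Char) : pvScanA l = l.all pvOk := by
  induction l with
  | nil => rfl
  | cons i rest ih =>
      simp only [pvScanA, List.all_cons]
      by_cases h : i ∈ pvValidSpecial
      · simp [pvOk, h, ih]
      · by_cases ha : is_alnum i = true
        · simp [pvOk, h, ha, ih]
        · simp [pvOk, h, ha]

-- ===== VERDICT (by name: the statement is the Claim_ definition above) =====
theorem is_valid_info_value_str_spec : Claim_equal_is_valid_info_value_str := by
  intro s _
  unfold Spec_is_valid_info_value_str is_valid_info_value_str is_valid_info_value_str_alt
  rw [scanA_eq_all, Bool.eq_iff_iff]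
  simp only [List.all_eq_true, PySem.Set.issubset_iff, PySem.Set.mem_ofList, mem_ALLOWED_iff]
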